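-- pv_equiv track=rewrite | github.com/LuciaAlmanza/Ejercicios-TDA | dinamica/11.py | operaciones
-- ===== SOURCE A (Python) =====
-- def operaciones(k):
--     # Inicializamos un arreglo dp con valores infinitos excepto dp[0]
--     dp = [float('inf')] * (k + 1)
--     dp[0] = 0  # Llegar a 0 requiere 0 operaciones
--
--     # Llenamos el arreglo dp con la cantidad mínima de operaciones para cada número
--     for i in range(1, k + 1):
--         # Operación de suma +1
--         dp[i] = dp[i - 1] + 1
--         # Operación de duplicar si i es par
--         if i % 2 == 0:
--             dp[i] = min(dp[i], dp[i // 2] + 1)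
--
--     # Ahora reconstruimos el camino de operaciones
--     operaciones = []
--     while k > 0:
--         if k % 2 == 0 and dp[k // 2] + 1 == dp[k]:  # Si el número es par y viene de k // 2
--             operaciones.append('por2')
--             k //= 2
--         else:  # Sino, la operación fue un +1
--             operaciones.append('mas1')
--             k -= 1
--
--     operaciones.reverse()  # Invertimos el orden para obtener desde 0 a K
--     return operaciones
-- ===== SOURCE B (Python) =====
-- def operaciones(k):
--     # Greedy over the binary digits of k: each bit costs one 'por2' (shift),
--     # a set bit additionally one 'mas1'; the leading shift is dropped.
--     ops = []
--     for b in bin(k)[2:]: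
--         ops.append('por2')
--         if b == '1':
--             ops.append('mas1')
--     return ops[1:]
-- ===== Notes on version B (the rewrite author's own statement) =====
-- stated objective: faster
-- what changed: B drops the O(k) dp table entirely and reads the path straight off k's binary digits (each bit = 'por2', each set bit adds 'mas1', leading shift dropped), O(log k) instead of O(k).
import Mathlib
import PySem

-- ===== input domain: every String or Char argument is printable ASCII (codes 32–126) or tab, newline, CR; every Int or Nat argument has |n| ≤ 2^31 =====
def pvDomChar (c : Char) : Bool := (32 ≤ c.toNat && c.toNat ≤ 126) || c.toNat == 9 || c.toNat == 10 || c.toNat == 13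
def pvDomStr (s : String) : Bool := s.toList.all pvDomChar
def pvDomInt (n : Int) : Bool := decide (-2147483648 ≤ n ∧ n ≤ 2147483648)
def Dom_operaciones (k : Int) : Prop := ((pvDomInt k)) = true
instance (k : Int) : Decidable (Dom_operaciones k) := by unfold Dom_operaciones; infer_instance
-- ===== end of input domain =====

-- B drops A's O(k) dp table and reads the operation path off k's binary digits (O(log k)).

-- ===== PORT A =====
-- dp cells are Option Int: none plays float('inf') (never read on any admitted input).
def dget (dp : Array (Option Int)) (i : Nat) : Int := (dp.getD i none).getD 0

-- body of A's `for i in range(1, k+1)` loop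
def dpStep (dp : Array (Option Int)) (i : Nat) : Array (Option Int) :=
  let dp1 := dp.setIfInBounds i (some (dget dp (i - 1) + 1))
  if i % 2 = 0 then dp1.setIfInBounds i (some (min (dget dp1 i) (dget dp1 (i / 2) + 1))) else dp1

-- A's `while k > 0` reconstruction loop (append, then one final reverse, as in A)
def reconA (dp : Array (Option Int)) (k : Nat) (acc : List String) : List String :=
  if h : k = 0 then acc.reverse
  else if k % 2 = 0 ∧ dget dp (k / 2) + 1 = dget dp k then
    reconA dp (k / 2) (acc ++ ["por2"])
  else
    reconA dp (k - 1) (acc ++ ["mas1"])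
termination_by k
decreasing_by
  · exact Nat.div_lt_self (Nat.pos_of_ne_zero h) (by omega)
  · omega

def operaciones (k : Int) : List String :=
  let n := k.toNat
  let dp0 := (Array.replicate (n + 1) (none : Option Int)).setIfInBounds 0 (some 0)
  let dp := (List.range' 1 n).foldl dpStep dp0
  reconA dp n []

-- ===== PORT B =====
-- the digits of bin(n), most significant first (bin(k)[2:] for k ≥ 1)
def binDigits (n : Nat) : List Char :=
  if n = 0 then [] else binDigits (n / 2) ++ [if n % 2 = 1 then '1' else '0']
termination_by n
decreasing_by exact Nat.div_lt_self (Nat.pos_of_ne_zero (by assumption)) (by omega)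

-- body of B's `for b in bin(k)[2:]` loop
def bstep (ops : List String) (b : Char) : List String :=
  let ops := ops ++ ["por2"]
  if b = '1' then ops ++ ["mas1"] else ops

def operaciones_alt (k : Int) : List String :=
  let ds := if k = 0 then ['0'] else binDigits k.toNat   -- bin(k)[2:] for k ≥ 0
  let ops := ds.foldl bstep []
  ops.drop 1                                             -- ops[1:]

-- ===== PRECONDITION & SPEC =====
-- A raises IndexError (dp[0] = 0 on an empty list) for every k < 0; those inputs are excluded.
def Pre_operaciones (k : Int) : Prop := 0 ≤ k
instance (k : Int) : Decidable (Pre_operaciones k) := by unfold Pre_operaciones; infer_instance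
def pvWitness_operaciones : Int := (6)

def Spec_operaciones (k : Int) (out : List String) : Prop := out = operaciones_alt k
instance (k : Int) (out : List String) : Decidable (Spec_operaciones k out) := by unfold Spec_operaciones; infer_instance

-- ===== CLAIM (what is proved, stated in full; the proofs are below) =====
def Claim_equal_operaciones : Prop := ∀ (k : Int), Dom_operaciones k → Pre_operaciones k → Spec_operaciones k (operaciones k)

-- ===== LEMMAS AND PROOFS =====

-- the value dp[n] holds: minimal number of +1/×2 operations to reach n
def f (n : Nat) : Int :=
  if n = 0 then 0 else if n % 2 = 0 then f (n / 2) + 1 else f (n - 1) + 1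
termination_by n
decreasing_by
  · exact Nat.div_lt_self (Nat.pos_of_ne_zero (by assumption)) (by omega)
  · omega

-- the forward operation path from 0 to n
def g (n : Nat) : List String :=
  if n = 0 then [] else if n % 2 = 0 then g (n / 2) ++ ["por2"] else g (n - 1) ++ ["mas1"]
termination_by n
decreasing_by
  · exact Nat.div_lt_self (Nat.pos_of_ne_zero (by assumption)) (by omega)
  · omega

theorem f_zero : f 0 = 0 := by rw [f]; simp
theorem f_even (n : Nat) (h : n ≠ 0) (h2 : n % 2 = 0) : f n = f (n / 2) + 1 := by
  conv_lhs => rw [f]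
  simp [h, h2]
theorem f_odd (n : Nat) (h2 : n % 2 = 1) : f n = f (n - 1) + 1 := by
  conv_lhs => rw [f]
  simp [h2, show n ≠ 0 by omega]

theorem g_zero : g 0 = [] := by rw [g]; simp
theorem g_even (n : Nat) (h : n ≠ 0) (h2 : n % 2 = 0) : g n = g (n / 2) ++ ["por2"] := by
  conv_lhs => rw [g]
  simp [h, h2]
theorem g_odd (n : Nat) (h2 : n % 2 = 1) : g n = g (n - 1) ++ ["mas1"] := by
  conv_lhs => rw [g]
  simp [h2, show n ≠ 0 by omega]

theorem f_step : ∀ n : Nat, f (n + 1) ≤ f n + 1 := by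
  intro n
  induction n using Nat.strong_induction_on with
  | _ n ih =>
    rcases Nat.even_or_odd (n+1) with he | ho
    · have h2 : (n+1) % 2 = 0 := Nat.even_iff.mp he
      rw [f_even (n+1) (by omega) h2]
      by_cases hm : (n+1)/2 = 1
      · have : n = 1 := by omega
        subst this
        simp [f_odd 1 (by norm_num), f_zero, hm]
      · have hm2 : 2 ≤ (n+1)/2 := by omega
        have hn1 : n % 2 = 1 := by omega
        rw [f_odd n hn1, f_even (n-1) (by omega) (by omega)]
        have : (n-1)/2 = (n+1)/2 - 1 := by omega
        rw [this]
        have := ih ((n+1)/2 - 1) (by omega)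
        have he2 : (n+1)/2 - 1 + 1 = (n+1)/2 := by omega
        rw [he2] at this
        omega
    · have h2 : (n+1) % 2 = 1 := Nat.odd_iff.mp ho
      rw [f_odd (n+1) h2]
      simp

theorem f_half_le (n : Nat) (h2 : 2 ≤ n) (he : n % 2 = 0) : f (n / 2) ≤ f (n - 1) := by
  by_cases hm : n / 2 = 1
  · have : n = 2 := by omega
    subst this; norm_num
  · have hm2 : 2 ≤ n / 2 := by omega
    rw [f_odd (n-1) (by omega), show n-1-1 = n-2 by omega,
      f_even (n-2) (by omega) (by omega)]
    have : (n-2)/2 = n/2 - 1 := by omega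
    rw [this]
    have := f_step (n/2 - 1)
    have he2 : n/2 - 1 + 1 = n/2 := by omega
    rw [he2] at this
    omega

theorem getD_set (a : Array (Option Int)) (i j : Nat) (v : Option Int) (h : i < a.size) :
    (a.setIfInBounds i v).getD j none = if i = j then v else a.getD j none := by
  simp [Array.getD_eq_getD_getElem?, Array.getElem?_setIfInBounds]
  split_ifs <;> simp_all

theorem repl_getD (n i : Nat) : ((Array.replicate n (none : Option Int))).getD i none = none := by
  simp [Array.getD_eq_getD_getElem?, Array.getElem?_replicate]
  split_ifs <;> simp

theorem dpStep_length (dp : Array (Option Int)) (i : Nat) : (dpStep dp i).size = dp.size := by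
  unfold dpStep
  split_ifs <;> simp

theorem foldl_dpStep_length (l : List Nat) (dp : Array (Option Int)) :
    (l.foldl dpStep dp).size = dp.size := by
  induction l generalizing dp with
  | nil => rfl
  | cons x xs ih => simp [List.foldl_cons, ih, dpStep_length]

theorem dp_inv (n : Nat) : ∀ j ≤ n, ∀ i ≤ n,
      ((List.range' 1 j).foldl dpStep
          ((Array.replicate (n + 1) (none : Option Int)).setIfInBounds 0 (some 0))).getD i none
        = if i ≤ j then some (f i) else none := by
  intro j
  induction j with
  | zero =>
    intro _ i hi
    simp only [List.range', List.foldl_nil]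
    rw [getD_set _ _ _ _ (by simp)]
    split_ifs with h1 h2 h2
    · simp [← h1, f_zero]
    · omega
    · omega
    · exact repl_getD _ _
  | succ j ih =>
    intro hj i hi
    have hj' : j ≤ n := by omega
    have hlen : ((List.range' 1 j).foldl dpStep
        ((Array.replicate (n + 1) (none : Option Int)).setIfInBounds 0 (some 0))).size = n + 1 := by
      rw [foldl_dpStep_length]; simp
    set dpj := (List.range' 1 j).foldl dpStep
        ((Array.replicate (n + 1) (none : Option Int)).setIfInBounds 0 (some 0)) with hdpj
    have hrange : List.range' 1 (j+1) = List.range' 1 j ++ [1 + j] := by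
      simpa using List.range'_concat (s:=1) (n:=j) (step:=1)
    rw [hrange, List.foldl_append, List.foldl_cons, List.foldl_nil, ← hdpj]
    have h1j : 1 + j = j + 1 := by omega
    rw [h1j]
    have hdgetj : dget dpj ((j+1) - 1) = f j := by
      unfold dget
      rw [show (j+1)-1 = j by omega, ih hj' j (by omega)]
      simp
    have hjlt : j + 1 < dpj.size := by omega
    unfold dpStep
    simp only [hdgetj]
    by_cases hev : (j + 1) % 2 = 0
    · -- even j+1
      rw [if_pos hev]
      have h2 : 2 ≤ j + 1 := by omega
      have hhalf : (j+1)/2 ≤ j := by omega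
      have hd1 : dget (dpj.setIfInBounds (j+1) (some (f j + 1))) (j+1) = f j + 1 := by
        unfold dget
        rw [getD_set _ _ _ _ hjlt]
        simp
      have hd2 : dget (dpj.setIfInBounds (j+1) (some (f j + 1))) ((j+1)/2) = f ((j+1)/2) := by
        unfold dget
        rw [getD_set _ _ _ _ hjlt]
        rw [if_neg (by omega), ih hj' ((j+1)/2) (by omega), if_pos hhalf]
        simp
      rw [hd1, hd2]
      have hmin : min (f j + 1) (f ((j+1)/2) + 1) = f ((j+1)/2) + 1 := by
        have := f_half_le (j+1) h2 hev
        rw [show j+1-1 = j by omega] at this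
        omega
      rw [hmin]
      have hlt2 : j + 1 < (dpj.setIfInBounds (j+1) (some (f j + 1))).size := by
        simpa using hjlt
      rw [getD_set _ _ _ _ hlt2, getD_set _ _ _ _ hjlt]
      by_cases hij : j + 1 = i
      · rw [if_pos hij, ← hij, f_even (j+1) (by omega) hev, if_pos (le_refl (j+1))]
      · rw [if_neg hij, if_neg hij, ih hj' i hi]
        by_cases hile : i ≤ j
        · rw [if_pos hile, if_pos (by omega)]
        · rw [if_neg hile, if_neg (by omega)]
    · -- odd j+1
      rw [if_neg hev]
      rw [getD_set _ _ _ _ hjlt]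
      by_cases hij : j + 1 = i
      · rw [if_pos hij, ← hij, if_pos (le_refl (j+1)), f_odd (j+1) (by omega)]
        rfl
      · rw [if_neg hij, ih hj' i hi]
        by_cases hile : i ≤ j
        · rw [if_pos hile, if_pos (by omega)]
        · rw [if_neg hile, if_neg (by omega)]

theorem recon_eq (n : Nat) : ∀ k, k ≤ n → ∀ acc,
      reconA ((List.range' 1 n).foldl dpStep
          ((Array.replicate (n + 1) (none : Option Int)).setIfInBounds 0 (some 0))) k acc
        = g k ++ acc.reverse := by
  intro k
  induction k using Nat.strong_induction_on with
  | _ k ih =>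
    intro hk acc
    set dpn := (List.range' 1 n).foldl dpStep
        ((Array.replicate (n + 1) (none : Option Int)).setIfInBounds 0 (some 0)) with hdpn
    have hd : ∀ i ≤ n, dget dpn i = f i := by
      intro i hi
      unfold dget
      rw [hdpn, dp_inv n n le_rfl i hi, if_pos hi]
      simp
    by_cases h0 : k = 0
    · subst h0
      conv_lhs => rw [reconA]
      simp [g_zero]
    · conv_lhs => rw [reconA]
      rw [dif_neg h0]
      by_cases hev : k % 2 = 0
      · rw [if_pos ⟨hev, by
          rw [hd (k/2) (by omega), hd k hk, f_even k h0 hev]⟩]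
        rw [ih (k/2) (Nat.div_lt_self (Nat.pos_of_ne_zero h0) (by omega)) (by omega) (acc ++ ["por2"]),
          g_even k h0 hev]
        simp
      · rw [if_neg (by simp [hev])]
        rw [ih (k-1) (by omega) (by omega) (acc ++ ["mas1"]),
          g_odd k (by omega)]
        simp

theorem binDigits_zero : binDigits 0 = [] := by rw [binDigits]; simp

theorem bfold : ∀ n : Nat, n ≠ 0 → ∀ acc : List String,
    (binDigits n).foldl bstep acc = acc ++ "por2" :: g n := by
  intro n
  induction n using Nat.strong_induction_on with
  | _ n ih =>
    intro hn acc
    conv_lhs => rw [binDigits]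
    rw [if_neg hn, List.foldl_append, List.foldl_cons, List.foldl_nil]
    by_cases h1 : n / 2 = 0
    · have : n = 1 := by omega
      subst this
      rw [binDigits_zero, List.foldl_nil]
      unfold bstep
      rw [g_odd 1 (by norm_num)]
      simp [g_zero]
    · rw [ih (n/2) (Nat.div_lt_self (Nat.pos_of_ne_zero hn) (by omega)) h1 acc]
      by_cases hev : n % 2 = 0
      · rw [if_neg (by omega)]
        unfold bstep
        rw [if_neg (by decide), g_even n hn hev]
        simp
      · rw [if_pos (by omega)]
        unfold bstep
        rw [if_pos rfl, g_odd n (by omega), g_even (n-1) (by omega) (by omega),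
          show (n-1)/2 = n/2 by omega]
        simp

theorem alt_eq_g (k : Int) (hk : 0 ≤ k) : operaciones_alt k = g k.toNat := by
  by_cases h0 : k = 0
  · subst h0
    simp [operaciones_alt, bstep, g_zero]
  · have hn : k.toNat ≠ 0 := by omega
    simp only [operaciones_alt, if_neg h0]
    rw [bfold k.toNat hn []]
    simp

-- ===== VERDICT (by name: the statement is the Claim_ definition above) =====
theorem operaciones_spec : Claim_equal_operaciones := by
  intro k _ hk
  unfold Spec_operaciones operaciones
  rw [alt_eq_g k hk, recon_eq k.toNat k.toNat le_rfl []]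
  simp
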